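-- pv_equiv track=rewrite | github.com/5xgold/alpha-origin | risk_control/signals/alert.py | classify_alerts
-- ===== SOURCE A (Python) =====
-- LEVEL_ORDER = ["watch", "warning", "danger"]
--
-- def classify_alerts(signals):
--     """将信号按预警级别分组
--
--     Args:
--         signals: list[dict] — 统一格式的信号列表
--
--     Returns:
--         dict: {"danger": [...], "warning": [...], "watch": [...]}
--     """
--     groups = {level: [] for level in LEVEL_ORDER}
--     for sig in signals:
--         level = sig.get("alert_level", "watch")
--         if level not in groups:
--             level = "watch"
--         groups[level].append(sig)
--     return groups
-- ===== SOURCE B (Python) =====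
-- LEVEL_ORDER = ["watch", "warning", "danger"]
--
-- def classify_alerts(signals):
--     def eff(sig):
--         level = sig.get("alert_level", "watch")
--         return level if level in LEVEL_ORDER else "watch"
--     return {level: [sig for sig in signals if eff(sig) == level] for level in LEVEL_ORDER}
-- ===== Notes on version B (the rewrite author's own statement) =====
-- stated objective: idiomatic
-- what changed: Replaces the single append-pass that mutates pre-seeded dict buckets with a dict comprehension over LEVEL_ORDER that builds each bucket by filtering the signals whose effective level equals that level.
import Mathlib
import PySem

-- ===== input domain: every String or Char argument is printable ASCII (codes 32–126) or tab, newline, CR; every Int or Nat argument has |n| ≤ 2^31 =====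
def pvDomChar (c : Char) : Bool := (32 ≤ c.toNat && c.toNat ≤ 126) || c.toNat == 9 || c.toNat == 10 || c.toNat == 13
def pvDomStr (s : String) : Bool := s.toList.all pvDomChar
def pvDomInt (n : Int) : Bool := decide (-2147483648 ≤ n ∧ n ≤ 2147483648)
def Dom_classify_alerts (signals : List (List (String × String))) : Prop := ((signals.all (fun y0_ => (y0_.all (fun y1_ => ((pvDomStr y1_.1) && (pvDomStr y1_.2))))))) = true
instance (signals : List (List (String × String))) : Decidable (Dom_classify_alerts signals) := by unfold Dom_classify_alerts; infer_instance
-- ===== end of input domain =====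

-- B groups the signals with one filtering scan per level instead of A's single
-- append-pass over pre-seeded dict buckets (idiomatic dict comprehension; not faster).

def LEVEL_ORDER : List String := ["watch", "warning", "danger"]

-- ===== PORT A =====
-- groups = {level: [] for level in LEVEL_ORDER}; append each sig to its bucket
def classify_alerts (signals : List (List (String × String))) : List (String × List (List (String × String))) :=
  let groups : PySem.Dict String (List (List (String × String))) :=
    LEVEL_ORDER.foldl (fun d level => d.insert level []) PySem.Dict.empty
  let groups :=
    signals.foldl (fun d sig =>
      let level := (List.lookup "alert_level" sig).getD "watch"   -- sig.get("alert_level","watch"), first match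
      let level := if d.contains level then level else "watch"
      d.modify level [] (fun xs => xs ++ [sig])) groups
  groups.items

-- ===== PORT B =====
-- eff(sig) = sig.get("alert_level","watch") normalized into LEVEL_ORDER
def pvEff (sig : List (String × String)) : String :=
  let level := (List.lookup "alert_level" sig).getD "watch"
  if level ∈ LEVEL_ORDER then level else "watch"

def classify_alerts_alt (signals : List (List (String × String))) : List (String × List (List (String × String))) :=
  LEVEL_ORDER.map (fun level => (level, signals.filter (fun sig => pvEff sig == level)))

-- ===== PRECONDITION & SPEC =====
def Spec_classify_alerts (signals : List (List (String × String))) (out : List (String × List (List (String × String)))) : Prop := out = classify_alerts_alt signals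
instance (signals : List (List (String × String))) (out : List (String × List (List (String × String)))) : Decidable (Spec_classify_alerts signals out) := by unfold Spec_classify_alerts; infer_instance

-- ===== CLAIM (what is proved, stated in full; the proofs are below) =====
def Claim_equal_classify_alerts : Prop := ∀ (signals : List (List (String × String))), Dom_classify_alerts signals → Spec_classify_alerts signals (classify_alerts signals)

-- ===== LEMMAS AND PROOFS =====

-- A's loop body, named for induction
def pvStepA (d : PySem.Dict String (List (List (String × String)))) (sig : List (String × String)) :
    PySem.Dict String (List (List (String × String))) :=
  let level := (List.lookup "alert_level" sig).getD "watch"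
  let level := if d.contains level then level else "watch"
  d.modify level [] (fun xs => xs ++ [sig])

lemma pvStepA_eq (d : PySem.Dict String (List (List (String × String)))) (sig : List (String × String))
    (hk : d.keys = LEVEL_ORDER) :
    pvStepA d sig = d.modify (pvEff sig) [] (fun xs => xs ++ [sig]) := by
  unfold pvStepA pvEff
  have hc : ∀ k, d.contains k = decide (k ∈ LEVEL_ORDER) := by
    intro k; rw [PySem.Dict.contains_eq_decide_mem_keys, hk]
  simp only [hc]
  by_cases h : ((List.lookup "alert_level" sig).getD "watch") ∈ LEVEL_ORDER <;> simp [h]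

lemma pvFoldA (signals : List (List (String × String)))
    (d : PySem.Dict String (List (List (String × String)))) (hk : d.keys = LEVEL_ORDER) :
    (signals.foldl pvStepA d).keys = LEVEL_ORDER ∧
    ∀ k, (signals.foldl pvStepA d).getD k [] =
      d.getD k [] ++ signals.filter (fun sig => pvEff sig == k) := by
  induction signals generalizing d with
  | nil => exact ⟨hk, fun k => by simp⟩
  | cons x xs ih =>
    have heff : pvEff x ∈ LEVEL_ORDER := by
      have he : pvEff x = (if ((List.lookup "alert_level" x).getD "watch") ∈ LEVEL_ORDER
          then ((List.lookup "alert_level" x).getD "watch") else "watch") := rfl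
      rw [he]
      split_ifs with h
      · exact h
      · simp [LEVEL_ORDER]
    have hk' : (pvStepA d x).keys = LEVEL_ORDER := by
      have hc : d.contains (pvEff x) = true := by
        rw [PySem.Dict.contains_eq_decide_mem_keys, hk]; simpa using heff
      rw [pvStepA_eq d x hk, PySem.Dict.keys_modify,
        PySem.Dict.keys_insert_of_contains _ _ hc, hk]
    obtain ⟨h1, h2⟩ := ih (pvStepA d x) hk'
    refine ⟨h1, fun k => ?_⟩
    rw [List.foldl_cons] at *
    rw [h2 k, pvStepA_eq d x hk, PySem.Dict.getD_modify]
    by_cases hkx : k = pvEff x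
    · subst hkx
      simp [List.append_assoc]
    · have hne : (pvEff x == k) = false := beq_eq_false_iff_ne.mpr (fun h => hkx h.symm)
      rw [if_neg hkx]
      simp [hne]

lemma pvInit_keys :
    (LEVEL_ORDER.foldl (fun d level => d.insert level ([] : List (List (String × String)))) PySem.Dict.empty).keys
      = LEVEL_ORDER := by decide

lemma pvInit_getD (k : String) :
    (LEVEL_ORDER.foldl (fun d level => d.insert level ([] : List (List (String × String)))) PySem.Dict.empty).getD k [] = [] := by
  simp [LEVEL_ORDER, PySem.Dict.getD_insert]

-- ===== VERDICT (by name: the statement is the Claim_ definition above) =====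
theorem classify_alerts_spec : Claim_equal_classify_alerts := by
  intro signals _
  unfold Spec_classify_alerts classify_alerts classify_alerts_alt
  have hfold := pvFoldA signals _ pvInit_keys
  obtain ⟨hkeys, hgetD⟩ := hfold
  have hnd : (signals.foldl pvStepA
      (LEVEL_ORDER.foldl (fun d level => d.insert level []) PySem.Dict.empty)).keys.Nodup := by
    rw [hkeys]; decide
  show (signals.foldl pvStepA _).items = _
  rw [PySem.Dict.items_eq_map_keys _ hnd ([] : List (List (String × String))), hkeys]
  have h : ∀ k, (signals.foldl pvStepA
      (LEVEL_ORDER.foldl (fun d level => d.insert level []) PySem.Dict.empty)).getD k []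
        = signals.filter (fun sig => pvEff sig == k) := by
    intro k; rw [hgetD k, pvInit_getD]; simp
  simp only [LEVEL_ORDER, List.foldl_cons, List.foldl_nil] at h ⊢
  simp only [List.map_cons, List.map_nil]
  rw [h "watch", h "warning", h "danger"]
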